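-- pv_equiv track=rewrite | github.com/JU571CECL0WN/projects | others/Calculator_binary_system.py | resolve_02
-- ===== SOURCE A (Python) =====
-- def resolve_02(number):
--     number = int(number)
--     result = 0
--     elevate = 0
--     while True:
--         if (2 ** elevate) > number:
--             elevate -= 1
--             number -= 2 ** elevate
--             return number, elevate
--         elif (2 ** elevate) == number:
--             number -= 2 ** elevate
--             return number, elevate
--         else:
--             elevate += 1
-- ===== SOURCE B (Python) =====
-- def resolve_02(number):
--     number = int(number)
--     e = number.bit_length() - 1
--     return number - 2 ** e, e
-- ===== Notes on version B (the rewrite author's own statement) =====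
-- stated objective: simpler
-- what changed: Replaces the incremental doubling loop with a closed-form floor-log2 via int.bit_length, so the exponent is computed directly with no iteration.
-- outside the precondition, e.g. on resolve_02(0): A returns (-0.5, -1), B returns (-0.5, -1); on resolve_02(-3): A returns (-3.5, -1), B returns (-5, 1)
import Mathlib
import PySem

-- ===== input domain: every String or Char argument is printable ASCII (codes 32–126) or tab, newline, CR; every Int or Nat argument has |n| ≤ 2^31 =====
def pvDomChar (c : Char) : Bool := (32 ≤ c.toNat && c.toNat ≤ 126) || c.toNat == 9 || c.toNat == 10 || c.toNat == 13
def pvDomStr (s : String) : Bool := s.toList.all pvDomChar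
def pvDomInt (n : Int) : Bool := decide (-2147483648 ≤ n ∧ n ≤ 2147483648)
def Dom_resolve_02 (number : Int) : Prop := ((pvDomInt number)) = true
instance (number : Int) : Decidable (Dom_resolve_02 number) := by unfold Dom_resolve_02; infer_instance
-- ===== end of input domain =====

-- B computes the exponent in closed form via bit_length (floor log2) instead of A's doubling loop.


-- ===== PORT A =====
-- A's `while True` loop; fuel only makes the recursion total (never reached inside Pre_).
def resolve_02Loop (number : Int) (elevate : Nat) : Nat → Int × Int
  | 0 => (0, 0)
  | fuel + 1 =>
    if (2 : Int) ^ elevate > number then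
      (number - 2 ^ (elevate - 1), (elevate : Int) - 1)
    else if (2 : Int) ^ elevate = number then
      (number - 2 ^ elevate, (elevate : Int))
    else
      resolve_02Loop number (elevate + 1) fuel

def resolve_02 (number : Int) : Int × Int :=
  resolve_02Loop number 0 (number.toNat + 1)

-- ===== PORT B =====
-- int.bit_length() - 1 on a positive int is floor log2 = Nat.log2.
def resolve_02_alt (number : Int) : Int × Int :=
  let e := number.toNat.log2
  (number - 2 ^ e, (e : Int))

-- ===== PRECONDITION & SPEC =====
-- Pre_ excludes non-positive inputs, on which A (and B) return a float remainder, not a value of the declared Int × Int type.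
def Pre_resolve_02 (number : Int) : Prop := 1 ≤ number
instance (number : Int) : Decidable (Pre_resolve_02 number) := by unfold Pre_resolve_02; infer_instance
def pvWitness_resolve_02 : Int := (5)

def Spec_resolve_02 (number : Int) (out : Int × Int) : Prop := out = resolve_02_alt number
instance (number : Int) (out : Int × Int) : Decidable (Spec_resolve_02 number out) := by unfold Spec_resolve_02; infer_instance

-- ===== CLAIM (what is proved, stated in full; the proofs are below) =====
def Claim_equal_resolve_02 : Prop := ∀ (number : Int), Dom_resolve_02 number → Pre_resolve_02 number → Spec_resolve_02 number (resolve_02 number)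

-- ===== LEMMAS AND PROOFS =====

lemma log2_eq_of_bounds {k : Nat} {n : Int} (h1 : (2:Int)^k ≤ n) (h2 : n < (2:Int)^(k+1)) :
    n.toNat.log2 = k := by
  have hn : 0 ≤ n := le_trans (by positivity) h1
  have h1' : 2 ^ k ≤ n.toNat := by
    have h := h1
    have : ((2 ^ k : Nat) : Int) ≤ n := by push_cast; exact h
    omega
  have h2' : n.toNat < 2 ^ (k + 1) := by
    have : ((n.toNat : Int)) < (2:Int)^(k+1) := by rwa [Int.toNat_of_nonneg hn]
    exact_mod_cast this
  rw [Nat.log2_eq_log_two]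
  exact Nat.log_eq_of_pow_le_of_lt_pow h1' h2'

lemma loop_correct (fuel : Nat) : ∀ (e : Nat) (number : Int), 1 ≤ number →
    (e = 0 ∨ (2:Int)^(e-1) < number) → 2 * number < (2:Int)^(e + fuel) →
    resolve_02Loop number e fuel = (number - 2 ^ number.toNat.log2, (number.toNat.log2 : Int)) := by
  induction fuel with
  | zero =>
    intro e number h1 hinv hf
    exfalso
    rcases hinv with he | he
    · subst he; simp at hf; omega
    · have he1 : 1 ≤ e := by
        rcases Nat.eq_zero_or_pos e with h | h
        · subst h; simp at he; omega
        · omega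
      have : (2:Int)^e = 2 * 2^(e-1) := by
        rw [← pow_succ']
        congr 1
        omega
      simp only [Nat.add_zero] at hf
      rw [this] at hf
      omega
  | succ fuel ih =>
    intro e number h1 hinv hf
    simp only [resolve_02Loop]
    by_cases hgt : (2 : Int) ^ e > number
    · rw [if_pos hgt]
      rcases hinv with he | he
      · exfalso; subst he; simp at hgt; omega
      · have he1 : 1 ≤ e := by
          rcases Nat.eq_zero_or_pos e with h | h
          · exfalso; subst h; simp at he; omega
          · omega
        have hlog : number.toNat.log2 = e - 1 := by
          apply log2_eq_of_bounds (le_of_lt he)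
          have : e - 1 + 1 = e := by omega
          rw [this]; exact hgt
        rw [hlog]
        have : ((e - 1 : Nat) : Int) = (e : Int) - 1 := by omega
        rw [this]
    · rw [if_neg hgt]
      by_cases heq : (2 : Int) ^ e = number
      · rw [if_pos heq]
        have hlog : number.toNat.log2 = e := by
          apply log2_eq_of_bounds (le_of_eq heq)
          rw [← heq, pow_succ]
          have : (0:Int) < 2^e := by positivity
          omega
        rw [hlog]
      · rw [if_neg heq]
        apply ih (e + 1) number h1
        · right
          simp only [Nat.add_sub_cancel]
          omega
        · have : e + 1 + fuel = e + (fuel + 1) := by omega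
          rw [this]; exact hf

-- ===== VERDICT (by name: the statement is the Claim_ definition above) =====
theorem resolve_02_spec : Claim_equal_resolve_02 := by
  intro number _ hpre
  have hpre' : 1 ≤ number := hpre
  unfold Spec_resolve_02 resolve_02 resolve_02_alt
  apply loop_correct (number.toNat + 1) 0 number hpre' (Or.inl rfl)
  have hn : (0:Int) ≤ number := by omega
  have h2 : number.toNat < 2 ^ number.toNat := Nat.lt_two_pow_self
  have h2' : ((number.toNat : Int)) < (2:Int) ^ number.toNat := by exact_mod_cast h2
  rw [Int.toNat_of_nonneg hn] at h2'
  have : (2:Int) ^ (0 + (number.toNat + 1)) = 2 * 2 ^ number.toNat := by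
    rw [Nat.zero_add, pow_succ]; ring
  rw [this]
  omega
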